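-- pv_equiv track=rewrite | github.com/pietro30/froneri | services/get_cip.py | freezer_dtb
-- ===== SOURCE A (Python) =====
-- def freezer_dtb(decimal_num):
--     if decimal_num < 0:
--         raise ValueError("Input must be a non-negative integer.")
--
--     binary_str = bin(decimal_num)[2:]  # Convert to binary and strip the '0b' prefix
--
--     # Reverse the binary string to process from right to left
--     reversed_binary_str = binary_str[::-1]
--
--     # Find the position of the first '0' in the reversed binary string
--     first_zero_position = reversed_binary_str.find('0')
--
--     if first_zero_position == -1:
--         return ""  # If there's no '0', return an empty string
--
--     positions = []
--
--     # Calculate the positions of '1's relative to the first '0'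
--     for i, bit in enumerate(reversed_binary_str):
--         if bit == '1':
--             relative_position = i - first_zero_position
--             positions.append(str(relative_position) if relative_position >= 0 else '-1')
--
--     return positions
-- ===== SOURCE B (Python) =====
-- def freezer_dtb(decimal_num):
--     if decimal_num < 0:
--         raise ValueError("Input must be a non-negative integer.")
--     # integer bit-arithmetic: strip trailing 1-bits, then scan the higher bits
--     n = decimal_num
--     z = 0
--     while n & 1:
--         n >>= 1
--         z += 1
--     positions = ['-1'] * z   # every 1-bit below the first 0-bit is at a negative offset
--     n >>= 1                  # skip the first 0-bit
--     j = 1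
--     while n:
--         if n & 1:
--             positions.append(str(j))
--         n >>= 1
--         j += 1
--     return positions
-- ===== Notes on version B (the rewrite author's own statement) =====
-- stated objective: alternative
-- what changed: B works in integer bit-arithmetic (strip trailing 1-bits by shifting, emit '-1' for each, then scan the remaining higher bits) instead of building, reversing and scanning a binary string char by char.
-- outside the precondition, e.g. on freezer_dtb(3): A returns '', B returns ['-1', '-1']; on freezer_dtb(1): A returns '', B returns ['-1']
import Mathlib
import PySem

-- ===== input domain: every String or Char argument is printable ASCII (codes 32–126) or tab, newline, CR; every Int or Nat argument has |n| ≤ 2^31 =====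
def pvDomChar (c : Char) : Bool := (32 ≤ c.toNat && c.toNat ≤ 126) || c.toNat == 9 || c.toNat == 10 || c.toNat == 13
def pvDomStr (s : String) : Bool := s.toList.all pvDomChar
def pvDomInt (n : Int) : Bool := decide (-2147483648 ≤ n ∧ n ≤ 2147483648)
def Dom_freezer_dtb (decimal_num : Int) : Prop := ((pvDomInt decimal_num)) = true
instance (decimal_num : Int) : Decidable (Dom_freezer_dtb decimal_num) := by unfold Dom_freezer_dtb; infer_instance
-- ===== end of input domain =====

-- B replaces A's binary-string build/reverse/scan by integer bit-arithmetic (strip trailing 1-bits, then scan the higher bits); alternative decomposition, same asymptotic cost.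


-- ===== PORT A =====
-- bin(n)[2:] as a list of chars (MSB first); exact for n ≥ 0, bin(0)[2:] = "0" handled at the call site
def binDigits (n : Nat) : List Char :=
  if h : n = 0 then []
  else binDigits (n / 2) ++ [if n % 2 = 1 then '1' else '0']
decreasing_by exact Nat.div_lt_self (Nat.pos_of_ne_zero h) (by norm_num)

-- the 'for i, bit in enumerate(reversed_binary_str)' loop, carrying the index i
def aLoop (l : List Char) (i : Nat) (fz : Nat) : List String :=
  match l with
  | [] => []
  | b :: rest =>
      (if b = '1' then
        [if (i : Int) - (fz : Int) ≥ 0 then PySem.Int.toStr ((i : Int) - (fz : Int)) else "-1"]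
       else []) ++ aLoop rest (i + 1) fz

def freezer_dtb (decimal_num : Int) : List String :=
  if decimal_num < 0 then []  -- Python raises ValueError here; outside Pre_
  else
    let binary_str := if decimal_num.toNat = 0 then ['0'] else binDigits decimal_num.toNat
    let rev := binary_str.reverse          -- [::-1], exact
    match rev.findIdx? (· = '0') with      -- str.find: none = -1, exact
    | none => []                           -- Python returns the string "" here; outside Pre_
    | some fz => aLoop rev 0 fz

-- ===== PORT B =====
-- the first while loop of Source B: shift out trailing 1-bits, counting them; returns (n, z)
def stripOnes (n : Nat) : Nat × Nat :=
  if h : n % 2 = 1 then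
    let p := stripOnes (n / 2)
    (p.1, p.2 + 1)
  else (n, 0)
decreasing_by exact Nat.div_lt_self (by omega) (by norm_num)

-- the second while loop of Source B: str(j) for each set bit (n & 1 = n % 2, n >> 1 = n / 2, exact on Nat)
def bLoop (n : Nat) (j : Nat) : List String :=
  if h : n = 0 then []
  else (if n % 2 = 1 then [PySem.Int.toStr (j : Int)] else []) ++ bLoop (n / 2) (j + 1)
decreasing_by exact Nat.div_lt_self (Nat.pos_of_ne_zero h) (by norm_num)

def freezer_dtb_alt (decimal_num : Int) : List String :=
  if decimal_num < 0 then []  -- Source B raises ValueError here; outside Pre_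
  else
    let p := stripOnes decimal_num.toNat
    List.replicate p.2 "-1" ++ bLoop (p.1 / 2) 1

-- ===== PRECONDITION & SPEC =====
-- Pre_ excludes negatives, where A raises ValueError, and the all-ones numbers 2^k - 1 (k ≥ 1),
-- where A returns the string "" instead of a list of strings (not a value of the declared type).
def Pre_freezer_dtb (decimal_num : Int) : Prop :=
  0 ≤ decimal_num ∧
    (decimal_num = 0 ∨ decimal_num ∉ (List.range 33).map (fun k => (2 : Int) ^ k - 1))
instance (decimal_num : Int) : Decidable (Pre_freezer_dtb decimal_num) := by
  unfold Pre_freezer_dtb; infer_instance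

def pvWitness_freezer_dtb : Int := 5

def Spec_freezer_dtb (decimal_num : Int) (out : List String) : Prop := out = freezer_dtb_alt decimal_num
instance (decimal_num : Int) (out : List String) : Decidable (Spec_freezer_dtb decimal_num out) := by unfold Spec_freezer_dtb; infer_instance

-- ===== CLAIM (what is proved, stated in full; the proofs are below) =====
def Claim_equal_freezer_dtb : Prop := ∀ (decimal_num : Int), Dom_freezer_dtb decimal_num → Pre_freezer_dtb decimal_num → Spec_freezer_dtb decimal_num (freezer_dtb decimal_num)

-- ===== LEMMAS AND PROOFS =====

-- the bits of n, LSB first (reverse of binDigits)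
def lsbDigits (n : Nat) : List Char :=
  if h : n = 0 then []
  else (if n % 2 = 1 then '1' else '0') :: lsbDigits (n / 2)
decreasing_by exact Nat.div_lt_self (Nat.pos_of_ne_zero h) (by norm_num)

theorem binDigits_eq_reverse (n : Nat) : binDigits n = (lsbDigits n).reverse := by
  induction n using Nat.strong_induction_on with
  | _ n ih =>
    by_cases h : n = 0
    · simp [binDigits, lsbDigits, h]
    · rw [binDigits, lsbDigits, dif_neg h, dif_neg h,
        ih (n / 2) (Nat.div_lt_self (Nat.pos_of_ne_zero h) (by norm_num))]
      simp

theorem stripOnes_fst_even (n : Nat) : (stripOnes n).1 % 2 = 0 := by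
  induction n using Nat.strong_induction_on with
  | _ n ih =>
    by_cases h : n % 2 = 1
    · rw [stripOnes, dif_pos h]
      exact ih (n / 2) (Nat.div_lt_self (by omega) (by norm_num))
    · rw [stripOnes, dif_neg h]; omega

theorem stripOnes_fst_zero (n : Nat) (h : (stripOnes n).1 = 0) :
    n = 2 ^ (stripOnes n).2 - 1 := by
  induction n using Nat.strong_induction_on with
  | _ n ih =>
    by_cases hodd : n % 2 = 1
    · rw [stripOnes, dif_pos hodd] at h ⊢
      have hih := ih (n / 2) (Nat.div_lt_self (by omega) (by norm_num)) h
      have hpos : 1 ≤ 2 ^ (stripOnes (n / 2)).2 := Nat.one_le_two_pow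
      simp only [pow_succ]
      omega
    · rw [stripOnes, dif_neg hodd] at h ⊢
      simpa using h

theorem lsbDigits_decomp (n : Nat) :
    lsbDigits n = List.replicate (stripOnes n).2 '1' ++ lsbDigits (stripOnes n).1 := by
  induction n using Nat.strong_induction_on with
  | _ n ih =>
    by_cases hodd : n % 2 = 1
    · rw [stripOnes, dif_pos hodd]
      rw [lsbDigits, dif_neg (by omega : n ≠ 0), if_pos hodd,
        ih (n / 2) (Nat.div_lt_self (by omega) (by norm_num))]
      simp [List.replicate_succ]
    · rw [stripOnes, dif_neg hodd]; simp

theorem findIdx_replicate_ones (z : Nat) (rest : List Char) :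
    List.findIdx? (· = '0') (List.replicate z '1' ++ '0' :: rest) = some z := by
  induction z with
  | zero => simp [List.findIdx?_cons]
  | succ k ih => simp [List.replicate_succ, List.findIdx?_cons, ih]

theorem aLoop_append (xs ys : List Char) (i fz : Nat) :
    aLoop (xs ++ ys) i fz = aLoop xs i fz ++ aLoop ys (i + xs.length) fz := by
  induction xs generalizing i with
  | nil => simp [aLoop]
  | cons b rest ih =>
    have hidx : i + 1 + rest.length = i + (rest.length + 1) := by omega
    simp [List.cons_append, aLoop, ih (i + 1), hidx, List.append_assoc]

theorem aLoop_replicate (k : Nat) : ∀ i z : Nat, i + k ≤ z →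
    aLoop (List.replicate k '1') i z = List.replicate k "-1" := by
  induction k with
  | zero => intro i z _; simp [aLoop]
  | succ m ih =>
    intro i z h
    rw [List.replicate_succ, aLoop, if_pos rfl,
      if_neg (by omega : ¬ ((i : Int) - (z : Int) ≥ 0)), ih (i + 1) z (by omega)]
    simp [List.replicate_succ]

theorem aLoop_lsb_eq_bLoop (m : Nat) : ∀ i z j : Nat, i = z + j → 1 ≤ j →
    aLoop (lsbDigits m) i z = bLoop m j := by
  induction m using Nat.strong_induction_on with
  | _ m ih =>
    intro i z j hi hj
    by_cases h : m = 0
    · simp [h, lsbDigits, bLoop, aLoop]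
    · rw [lsbDigits, dif_neg h, bLoop, dif_neg h]
      have hrec := ih (m / 2) (Nat.div_lt_self (Nat.pos_of_ne_zero h) (by norm_num))
        (i + 1) z (j + 1) (by omega) (by omega)
      by_cases hodd : m % 2 = 1
      · rw [if_pos hodd, if_pos hodd, aLoop, if_pos rfl,
          if_pos (by omega : (i : Int) - (z : Int) ≥ 0), hrec]
        have : (i : Int) - (z : Int) = (j : Int) := by omega
        rw [this]
      · rw [if_neg hodd, if_neg hodd]
        simp [aLoop, hrec]

theorem lsbDigits_even_ne_zero (m : Nat) (h0 : m ≠ 0) (he : m % 2 = 0) :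
    lsbDigits m = '0' :: lsbDigits (m / 2) := by
  rw [lsbDigits, dif_neg h0, if_neg (by omega)]

-- ===== VERDICT (by name: the statement is the Claim_ definition above) =====
theorem freezer_dtb_spec : Claim_equal_freezer_dtb := by
  intro d _hdom hpre
  obtain ⟨hnn, hrest⟩ := hpre
  show freezer_dtb d = freezer_dtb_alt d
  by_cases hz : d.toNat = 0
  · have hd0 : d = 0 := by omega
    subst hd0
    have h1 : stripOnes 0 = (0, 0) := by rw [stripOnes]; simp
    have h2 : bLoop 0 1 = [] := by rw [bLoop]; simp
    simp [freezer_dtb, freezer_dtb_alt, h1, h2, List.findIdx?_cons, aLoop]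
  · have hlt : ¬ d < 0 := by omega
    set n := d.toNat with hn
    -- the stripped value is nonzero: otherwise n = 2^z - 1, excluded by Pre_
    have hm0 : (stripOnes n).1 ≠ 0 := by
      intro hm
      have hpow := stripOnes_fst_zero n hm
      have hne0 : d ≠ 0 := by omega
      have h1 : 1 ≤ (2 : Nat) ^ (stripOnes n).2 := Nat.one_le_two_pow
      have hmem : d ∈ (List.range 33).map (fun k => (2 : Int) ^ k - 1) := by
        have hbound : (stripOnes n).2 < 33 := by
          by_contra hb
          have h33 : (2 : Nat) ^ 33 ≤ 2 ^ (stripOnes n).2 :=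
            Nat.pow_le_pow_right (by norm_num) (by omega)
          have hdn : n ≤ 2147483648 := by
            have hD := _hdom
            unfold Dom_freezer_dtb pvDomInt at hD
            simp at hD
            omega
          have h33' : (2 : Nat) ^ 33 = 8589934592 := by norm_num
          omega
        refine List.mem_map.mpr ⟨(stripOnes n).2, List.mem_range.mpr hbound, ?_⟩
        have h2 : n + 1 = 2 ^ (stripOnes n).2 := by omega
        have h3 : (n : Int) + 1 = (2 : Int) ^ (stripOnes n).2 := by exact_mod_cast h2
        have hd : d = (n : Int) := by omega
        rw [hd]
        linarith
      rcases hrest with h | h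
      · exact hne0 h
      · exact h hmem
    have heven := stripOnes_fst_even n
    have hfind : ((lsbDigits n).findIdx? (· = '0')) = some (stripOnes n).2 := by
      rw [lsbDigits_decomp n, lsbDigits_even_ne_zero _ hm0 heven]
      exact findIdx_replicate_ones _ _
    rw [freezer_dtb, freezer_dtb_alt, if_neg hlt, if_neg hlt]
    simp only [← hn, if_neg hz, binDigits_eq_reverse, List.reverse_reverse, hfind]
    rw [lsbDigits_decomp n, lsbDigits_even_ne_zero _ hm0 heven]
    rw [aLoop_append, aLoop_replicate _ 0 (stripOnes n).2 (by simp), List.length_replicate]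
    rw [aLoop, if_neg (by decide)]
    rw [aLoop_lsb_eq_bLoop ((stripOnes n).1 / 2) (0 + (stripOnes n).2 + 1) (stripOnes n).2 1
      (by omega) (by omega)]
    simp
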